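-- pv_equiv track=rewrite | github.com/SYSY5959/Coding-Test | 프로그래머스/2/148653. 마법의 엘리베이터/마법의 엘리베이터.py | solution
-- ===== SOURCE A (Python) =====
-- def solution(storey):
--     answer = 0
--     while storey > 0:
--         last_digit = storey%10
--         next_digit = (storey//10)%10 # 마지막 자리수 5 처리할 때 필요
--         # 층수 올라가야할 때
--         if last_digit > 5:
--             storey += (10-last_digit)
--             answer += (10-last_digit)
--         # 층수 내려가야할 때
--         elif last_digit < 5:
--             storey -= last_digit
--             answer += last_digit
--         # 일의자리가 5일 땐, 그 앞자리 수 보고 결정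
--         else:
--             if next_digit >= 5: # 올라가기
--                 storey += (10-last_digit)
--                 answer += (10-last_digit)
--             else:   # 내려가기
--                 storey -= last_digit
--                 answer += last_digit
--
--         # 처리된 일의자리 없애기
--         storey //= 10
--
--     return answer
-- ===== SOURCE B (Python) =====
-- def solution(storey):
--     # Recurrence on the digit structure: explore round-down / round-up and take the min.
--     if storey <= 0:
--         return 0
--     d = storey % 10
--     q = storey // 10
--     if d < 5:
--         return d + solution(q)
--     if d > 5:
--         return (10 - d) + solution(q + 1)
--     return 5 + min(solution(q), solution(q + 1))
-- ===== Notes on version B (the rewrite author's own statement) =====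
-- stated objective: alternative
-- what changed: Replaced A's iterative greedy loop (which peeks at the next digit to break the halfway tie) with a structural recursion on the digits that explores both round-down and round-up at a halfway digit and takes the minimum.
import Mathlib
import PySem

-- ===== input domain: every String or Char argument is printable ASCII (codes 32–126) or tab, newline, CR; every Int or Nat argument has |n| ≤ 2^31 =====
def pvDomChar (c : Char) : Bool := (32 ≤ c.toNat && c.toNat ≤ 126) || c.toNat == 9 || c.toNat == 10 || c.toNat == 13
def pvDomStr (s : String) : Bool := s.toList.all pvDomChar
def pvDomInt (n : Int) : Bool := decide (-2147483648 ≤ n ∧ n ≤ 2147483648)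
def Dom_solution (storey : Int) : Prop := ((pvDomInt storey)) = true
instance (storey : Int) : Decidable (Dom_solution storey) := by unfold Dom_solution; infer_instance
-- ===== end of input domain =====

-- B replaces A's greedy loop (next-digit peek at a trailing 5) by a digit recursion
-- taking the min of round-down and round-up; alternative decomposition, same results.

-- ===== PORT A =====
-- A's while loop as a tail recursion on (storey, answer), made structural with a
-- fuel counter (storey.toNat iterations always suffice: storey strictly decreases);
-- the Python locals last_digit / next_digit are written out inline.
def solutionLoopFuel : Nat → Int → Int → Int
  | 0, _, answer => answer
  | fuel + 1, storey, answer =>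
    if storey > 0 then
      if PySem.Int.mod storey 10 > 5 then
        solutionLoopFuel fuel (PySem.Int.floordiv (storey + (10 - PySem.Int.mod storey 10)) 10)
          (answer + (10 - PySem.Int.mod storey 10))
      else if PySem.Int.mod storey 10 < 5 then
        solutionLoopFuel fuel (PySem.Int.floordiv (storey - PySem.Int.mod storey 10) 10)
          (answer + PySem.Int.mod storey 10)
      else if PySem.Int.mod (PySem.Int.floordiv storey 10) 10 ≥ 5 then
        solutionLoopFuel fuel (PySem.Int.floordiv (storey + (10 - PySem.Int.mod storey 10)) 10)
          (answer + (10 - PySem.Int.mod storey 10))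
      else
        solutionLoopFuel fuel (PySem.Int.floordiv (storey - PySem.Int.mod storey 10) 10)
          (answer + PySem.Int.mod storey 10)
    else answer

def solution (storey : Int) : Int := solutionLoopFuel storey.toNat storey 0

-- ===== PORT B =====
-- Source B's digit recursion (round-down / round-up, min at a halfway last digit), structural
-- on the same fuel counter; the locals d = storey % 10, q = storey // 10 inline.
def solutionAltFuel : Nat → Int → Int
  | 0, _ => 0
  | fuel + 1, storey =>
    if storey ≤ 0 then 0
    else if PySem.Int.mod storey 10 < 5 then
      PySem.Int.mod storey 10 + solutionAltFuel fuel (PySem.Int.floordiv storey 10)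
    else if PySem.Int.mod storey 10 > 5 then
      (10 - PySem.Int.mod storey 10) + solutionAltFuel fuel (PySem.Int.floordiv storey 10 + 1)
    else
      5 + min (solutionAltFuel fuel (PySem.Int.floordiv storey 10))
        (solutionAltFuel fuel (PySem.Int.floordiv storey 10 + 1))

def solution_alt (storey : Int) : Int := solutionAltFuel storey.toNat storey

-- ===== PRECONDITION & SPEC =====
def Spec_solution (storey : Int) (out : Int) : Prop := out = solution_alt storey
instance (storey : Int) (out : Int) : Decidable (Spec_solution storey out) := by unfold Spec_solution; infer_instance

-- ===== CLAIM (what is proved, stated in full; the proofs are below) =====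
def Claim_equal_solution : Prop := ∀ (storey : Int), Dom_solution storey → Spec_solution storey (solution storey)

-- ===== LEMMAS AND PROOFS =====

-- Unfolding and fuel lemmas, with Python's // and % rewritten to Lean's / and %.
lemma alt_nonpos {n : Int} (h : n ≤ 0) : solution_alt n = 0 := by
  unfold solution_alt
  rw [show n.toNat = 0 by omega]
  rfl

lemma altFuel_succ {s : Int} (h : 0 < s) (f : Nat) :
    solutionAltFuel (f + 1) s =
      if s % 10 < 5 then s % 10 + solutionAltFuel f (s / 10)
      else if s % 10 > 5 then (10 - s % 10) + solutionAltFuel f (s / 10 + 1)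
      else 5 + min (solutionAltFuel f (s / 10)) (solutionAltFuel f (s / 10 + 1)) := by
  rw [solutionAltFuel]
  simp only [if_neg (show ¬ s ≤ 0 by omega),
    PySem.Int.mod_eq_emod_of_pos (show (0:Int) < 10 by norm_num),
    PySem.Int.floordiv_eq_ediv_of_pos (show (0:Int) < 10 by norm_num)]

lemma altFuel_irrel : ∀ f g : Nat, ∀ s : Int, s.toNat ≤ f → s.toNat ≤ g →
    solutionAltFuel f s = solutionAltFuel g s := by
  intro f
  induction f with
  | zero =>
      intro g s hf hg
      have hs : s ≤ 0 := by omega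
      cases g with
      | zero => rfl
      | succ g => simp only [solutionAltFuel, if_pos hs]
  | succ f ih =>
      intro g s hf hg
      by_cases hs : 0 < s
      · obtain ⟨g', rfl⟩ : ∃ g', g = g' + 1 := ⟨g - 1, by omega⟩
        rw [altFuel_succ hs f, altFuel_succ hs g']
        split_ifs with h1 h2
        · rw [ih g' (s / 10) (by omega) (by omega)]
        · rw [ih g' (s / 10 + 1) (by omega) (by omega)]
        · rw [ih g' (s / 10) (by omega) (by omega),
            ih g' (s / 10 + 1) (by omega) (by omega)]
      · have hs0 : s ≤ 0 := by omega
        cases g with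
        | zero => simp only [solutionAltFuel, if_pos hs0]
        | succ g => simp only [solutionAltFuel, if_pos hs0]

lemma alt_pos {n : Int} (h : 0 < n) :
    solution_alt n =
      if n % 10 < 5 then n % 10 + solution_alt (n / 10)
      else if n % 10 > 5 then (10 - n % 10) + solution_alt (n / 10 + 1)
      else 5 + min (solution_alt (n / 10)) (solution_alt (n / 10 + 1)) := by
  unfold solution_alt
  obtain ⟨k, hk⟩ : ∃ k, n.toNat = k + 1 := ⟨n.toNat - 1, by omega⟩
  rw [hk, altFuel_succ h k]
  split_ifs with g1 g2
  · rw [altFuel_irrel k (n / 10).toNat (n / 10) (by omega) le_rfl]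
  · rw [altFuel_irrel k (n / 10 + 1).toNat (n / 10 + 1) (by omega) le_rfl]
  · rw [altFuel_irrel k (n / 10).toNat (n / 10) (by omega) le_rfl,
      altFuel_irrel k (n / 10 + 1).toNat (n / 10 + 1) (by omega) le_rfl]

lemma alt_one : solution_alt (1 : Int) = 1 := by
  rw [alt_pos (by norm_num)]
  norm_num [alt_nonpos (le_refl (0 : Int))]

lemma loopFuel_nonpos : ∀ (f : Nat) {s : Int}, ¬ s > 0 → ∀ a : Int,
    solutionLoopFuel f s a = a := by
  intro f
  cases f with
  | zero => intro s _ a; rfl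
  | succ f => intro s h a; rw [solutionLoopFuel, if_neg h]

lemma loopFuel_succ {s : Int} (h : 0 < s) (f : Nat) (a : Int) :
    solutionLoopFuel (f + 1) s a =
      if s % 10 > 5 then solutionLoopFuel f (s / 10 + 1) (a + (10 - s % 10))
      else if s % 10 < 5 then solutionLoopFuel f (s / 10) (a + s % 10)
      else if (s / 10) % 10 ≥ 5 then solutionLoopFuel f (s / 10 + 1) (a + (10 - s % 10))
      else solutionLoopFuel f (s / 10) (a + s % 10) := by
  rw [solutionLoopFuel]
  simp only [if_pos h,
    PySem.Int.mod_eq_emod_of_pos (show (0:Int) < 10 by norm_num),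
    PySem.Int.floordiv_eq_ediv_of_pos (show (0:Int) < 10 by norm_num)]
  rw [show (s + (10 - s % 10)) / 10 = s / 10 + 1 by omega,
    show (s - s % 10) / 10 = s / 10 by omega]

lemma loopFuel_acc : ∀ f : Nat, ∀ s a : Int,
    solutionLoopFuel f s a = a + solutionLoopFuel f s 0 := by
  intro f
  induction f with
  | zero => intro s a; simp [solutionLoopFuel]
  | succ f ih =>
      intro s a
      by_cases hs : 0 < s
      · rw [loopFuel_succ hs f a, loopFuel_succ hs f 0]
        split_ifs <;> rw [ih, ih (_ : Int) (0 + _)] <;> ring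
      · rw [loopFuel_nonpos _ hs, loopFuel_nonpos _ hs]; ring

lemma loopFuel_irrel : ∀ f g : Nat, ∀ s a : Int, s.toNat ≤ f → s.toNat ≤ g →
    solutionLoopFuel f s a = solutionLoopFuel g s a := by
  intro f
  induction f with
  | zero =>
      intro g s a hf hg
      rw [loopFuel_nonpos 0 (by omega : ¬ s > 0), loopFuel_nonpos g (by omega : ¬ s > 0)]
  | succ f ih =>
      intro g s a hf hg
      by_cases hs : 0 < s
      · obtain ⟨g', rfl⟩ : ∃ g', g = g' + 1 := ⟨g - 1, by omega⟩
        rw [loopFuel_succ hs f a, loopFuel_succ hs g' a]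
        split_ifs with h1 h2 h3
        · exact ih g' (s / 10 + 1) _ (by omega) (by omega)
        · exact ih g' (s / 10) _ (by omega) (by omega)
        · exact ih g' (s / 10 + 1) _ (by omega) (by omega)
        · exact ih g' (s / 10) _ (by omega) (by omega)
      · rw [loopFuel_nonpos _ hs, loopFuel_nonpos _ hs]

lemma a_nonpos {n : Int} (h : n ≤ 0) : solution n = 0 := by
  unfold solution
  rw [show n.toNat = 0 by omega]
  rfl

lemma a_pos {n : Int} (h : 0 < n) :
    solution n =
      if n % 10 > 5 then (10 - n % 10) + solution (n / 10 + 1)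
      else if n % 10 < 5 then n % 10 + solution (n / 10)
      else if (n / 10) % 10 ≥ 5 then (10 - n % 10) + solution (n / 10 + 1)
      else n % 10 + solution (n / 10) := by
  unfold solution
  obtain ⟨k, hk⟩ : ∃ k, n.toNat = k + 1 := ⟨n.toNat - 1, by omega⟩
  rw [hk, loopFuel_succ h k 0]
  split_ifs with g1 g2 g3 <;>
    rw [loopFuel_acc,
      loopFuel_irrel k _ _ 0 (by omega) le_rfl] <;> ring

-- Step lemma for B: moving from n to n+1 changes the cost by at most 1, downward
-- exactly when the last digit is ≥ 5.
lemma alt_step : ∀ k : Nat, ∀ n : Int, 0 ≤ n → n.toNat ≤ k →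
    (n % 10 < 5 → solution_alt n ≤ solution_alt (n + 1) ∧
      solution_alt (n + 1) ≤ solution_alt n + 1) ∧
    (5 ≤ n % 10 → solution_alt n - 1 ≤ solution_alt (n + 1) ∧
      solution_alt (n + 1) ≤ solution_alt n) := by
  intro k
  induction k with
  | zero =>
      intro n hn hk
      have hn0 : n = 0 := by omega
      subst hn0
      constructor
      · intro _
        norm_num [alt_nonpos (le_refl (0 : Int)), alt_one]
      · intro h; omega
  | succ k ih =>
      intro n hn hk
      rcases eq_or_lt_of_le hn with h0 | hpos
      · -- n = 0 : same as base case
        subst h0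
        constructor
        · intro _
          norm_num [alt_nonpos (le_refl (0 : Int)), alt_one]
        · intro h; omega
      · set d := n % 10 with hd
        set q := n / 10 with hq
        have hd0 : 0 ≤ d := by omega
        have hd9 : d ≤ 9 := by omega
        have hq0 : 0 ≤ q := by positivity
        have hqk : q.toNat ≤ k := by omega
        have ihq := ih q hq0 hqk
        -- bounds relating solution_alt q and solution_alt (q+1)
        have hb1 : solution_alt q - 1 ≤ solution_alt (q + 1) := by
          rcases lt_or_ge (q % 10) 5 with h | h
          · have := (ihq.1 h).1; omega
          · exact (ihq.2 h).1
        have hb2 : solution_alt (q + 1) ≤ solution_alt q + 1 := by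
          rcases lt_or_ge (q % 10) 5 with h | h
          · exact (ihq.1 h).2
          · have := (ihq.2 h).2; omega
        have hmin := min_choice (solution_alt q) (solution_alt (q + 1))
        have hminl := min_le_left (solution_alt q) (solution_alt (q + 1))
        have hminr := min_le_right (solution_alt q) (solution_alt (q + 1))
        rcases lt_or_ge d 9 with h9 | h9
        · -- n+1 keeps the same quotient: (n+1)%10 = d+1, (n+1)/10 = q
          have em : (n + 1) % 10 = d + 1 := by omega
          have eq' : (n + 1) / 10 = q := by omega
          rw [alt_pos hpos, alt_pos (by omega : (0:Int) < n + 1), em, eq', ← hd, ← hq]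
          constructor
          · intro hlt
            rcases lt_or_ge (d + 1) 5 with h5 | h5
            · rw [if_pos hlt, if_pos h5]; omega
            · -- d = 4 : n+1 ends in 5
              have hd4 : d = 4 := by omega
              rw [if_pos hlt, if_neg (by omega), if_neg (by omega)]
              omega
          · intro hge
            rcases lt_or_ge d 6 with h6 | h6
            · -- d = 5 : n+1 ends in 6
              have hd5 : d = 5 := by omega
              rw [if_neg (by omega), if_neg (by omega), if_neg (by omega),
                if_pos (by omega : d + 1 > 5)]
              omega
            · -- 6 ≤ d ≤ 8
              rw [if_neg (by omega), if_pos (by omega : d > 5),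
                if_neg (by omega), if_pos (by omega : d + 1 > 5)]
              omega
        · -- d = 9 : carry, (n+1)%10 = 0, (n+1)/10 = q+1
          have hd9' : d = 9 := by omega
          have em : (n + 1) % 10 = 0 := by omega
          have eq' : (n + 1) / 10 = q + 1 := by omega
          constructor
          · intro hlt; omega
          · intro _
            rw [alt_pos hpos, alt_pos (by omega : (0:Int) < n + 1), em, eq', ← hd, ← hq]
            rw [if_neg (by omega), if_pos (by omega : d > 5),
              if_pos (by omega : (0:Int) < 5)]
            omega

-- Main equivalence by fuel induction on the magnitude of storey.
lemma main_eq : ∀ k : Nat, ∀ n : Int, n.toNat ≤ k → solution n = solution_alt n := by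
  intro k
  induction k with
  | zero =>
      intro n hk
      rw [a_nonpos (by omega), alt_nonpos (by omega)]
  | succ k ih =>
      intro n hk
      rcases le_or_gt n 0 with h0 | hpos
      · rw [a_nonpos (by omega), alt_nonpos h0]
      · set d := n % 10 with hd
        set q := n / 10 with hq
        have hd0 : 0 ≤ d := by omega
        have hq0 : 0 ≤ q := by positivity
        have hqk : q.toNat ≤ k := by omega
        rw [a_pos hpos, alt_pos hpos, ← hd, ← hq]
        rcases lt_or_ge d 5 with h5 | h5
        · rw [if_neg (by omega), if_pos h5, if_pos h5, ih q hqk]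
        · rcases lt_or_ge 5 d with h5' | h5'
          · have hn6 : 6 ≤ n := by omega
            have hq1k : (q + 1).toNat ≤ k := by omega
            rw [if_pos h5', if_neg (by omega), if_pos h5', ih (q + 1) hq1k]
          · -- d = 5 : greedy tie-break vs min over both branches
            have hd5 : d = 5 := by omega
            have hn5 : 5 ≤ n := by omega
            have hq1k : (q + 1).toNat ≤ k := by omega
            have step := alt_step k q hq0 hqk
            rcases lt_or_ge (q % 10) 5 with hnx | hnx
            · -- next digit < 5 : A rounds down; min is solution_alt q
              rw [if_neg (show ¬ d > 5 by omega), if_neg (show ¬ d < 5 by omega),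
                if_neg (show ¬ 5 ≤ q % 10 by omega), if_neg (show ¬ d < 5 by omega),
                if_neg (show ¬ d > 5 by omega)]
              have hle := (step.1 hnx).1
              rw [min_eq_left hle, ih q hqk]
              omega
            · -- next digit ≥ 5 : A rounds up; min is solution_alt (q+1)
              rw [if_neg (show ¬ d > 5 by omega), if_neg (show ¬ d < 5 by omega),
                if_pos hnx, if_neg (show ¬ d < 5 by omega),
                if_neg (show ¬ d > 5 by omega)]
              have hle := (step.2 hnx).2
              rw [min_eq_right hle, ih (q + 1) hq1k]
              omega

-- ===== VERDICT (by name: the statement is the Claim_ definition above) =====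
theorem solution_spec : Claim_equal_solution := by
  intro storey _
  unfold Spec_solution
  exact main_eq storey.toNat storey le_rfl
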